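-- pv_equiv track=rewrite | github.com/nicolaslhote88/Trader_IA | infra/maintenance/ag4_geo_backfill/backfill_geo_tags.py | sanitize_csv
-- ===== SOURCE A (Python) =====
-- from typing import Any
--
-- def sanitize_csv(raw: Any, allowed: set[str], default: str = "Other") -> tuple[str, list[str]]:
--     if raw is None:
--         return default, []
--     if isinstance(raw, list):
--         parts = [str(x).strip() for x in raw if str(x).strip()]
--     else:
--         parts = [p.strip() for p in str(raw).split(",") if p.strip()]
--     if not parts:
--         return default, []
--     kept: list[str] = []
--     violations: list[str] = []
--     for part in parts:
--         if part in allowed and part not in kept: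
--             kept.append(part)
--         elif part not in allowed:
--             violations.append(part)
--     return (", ".join(kept) if kept else default), violations
-- ===== SOURCE B (Python) =====
-- def sanitize_csv(raw, allowed, default="Other"):
--     if raw is None:
--         return default, []
--     if isinstance(raw, list):
--         parts = [str(x).strip() for x in raw if str(x).strip()]
--     else:
--         parts = [p.strip() for p in str(raw).split(",") if p.strip()]
--     if not parts:
--         return default, []
--     # Worklist loop: consume the head; when an allowed tag is accepted, delete
--     # all its future duplicates from the worklist, so no membership check
--     # against `kept` is ever needed.
--     kept, violations = [], []
--     work = parts
--     while work:
--         h, work = work[0], work[1:]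
--         if h in allowed:
--             kept.append(h)
--             work = [q for q in work if q != h]
--         else:
--             violations.append(h)
--     return (", ".join(kept) if kept else default), violations
-- ===== Notes on version B (the rewrite author's own statement) =====
-- stated objective: alternative
-- what changed: Replaced A's single pass that dedups via a membership test against the growing kept list with a shrinking-worklist loop: each accepted allowed tag is appended once and all of its future duplicates are deleted from the worklist, so no check against kept exists at all.
import Mathlib
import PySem

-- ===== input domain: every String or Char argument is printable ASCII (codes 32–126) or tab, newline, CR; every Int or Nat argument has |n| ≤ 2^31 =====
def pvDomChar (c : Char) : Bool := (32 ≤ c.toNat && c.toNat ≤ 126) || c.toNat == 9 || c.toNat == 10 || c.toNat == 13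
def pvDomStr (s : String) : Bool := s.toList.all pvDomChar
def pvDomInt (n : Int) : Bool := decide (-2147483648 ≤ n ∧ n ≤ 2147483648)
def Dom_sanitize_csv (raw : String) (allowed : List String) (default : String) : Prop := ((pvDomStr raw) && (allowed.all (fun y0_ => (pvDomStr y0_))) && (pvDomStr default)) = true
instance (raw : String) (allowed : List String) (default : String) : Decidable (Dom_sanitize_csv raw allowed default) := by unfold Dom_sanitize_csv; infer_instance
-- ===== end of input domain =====

-- B replaces A's kept-membership dedup pass with a shrinking-worklist loop that deletes
-- future duplicates of each accepted tag (alternative decomposition, same cost).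

-- ===== PORT A =====
-- raw is typed String here, so the 'raw is None' and 'isinstance(raw, list)' branches are unreachable; str(raw) = raw.
def sanitize_csv (raw : String) (allowed : List String) (default : String) : String × List String :=
  let parts := (((PySem.Str.split? raw ",").getD []).map (fun p => PySem.Str.strip p)).filter (fun p => p ≠ "")
  if parts = [] then (default, [])
  else
    let kv := parts.foldl (fun (acc : List String × List String) part =>
      if part ∈ allowed ∧ part ∉ acc.1 then (acc.1 ++ [part], acc.2)
      else if part ∉ allowed then (acc.1, acc.2 ++ [part])
      else acc) ([], [])
    ((if kv.1 ≠ [] then PySem.Str.join ", " kv.1 else default), kv.2)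

-- ===== PORT B =====
-- B's while-loop over the shrinking worklist `work`, with accumulators kept/violations.
def sanitizeWork (allowed : List String) : List String → List String → List String → List String × List String
  | [], kept, viol => (kept, viol)
  | h :: work, kept, viol =>
    if h ∈ allowed then
      sanitizeWork allowed (work.filter (fun q => decide (q ≠ h))) (kept ++ [h]) viol
    else
      sanitizeWork allowed work kept (viol ++ [h])
termination_by work => work.length
decreasing_by
  · exact Nat.lt_succ_of_le (by simpa using List.length_filter_le _ work.attach)
  · simp

def sanitize_csv_alt (raw : String) (allowed : List String) (default : String) : String × List String :=
  let parts := (((PySem.Str.split? raw ",").getD []).map (fun p => PySem.Str.strip p)).filter (fun p => p ≠ "")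
  if parts = [] then (default, [])
  else
    let kv := sanitizeWork allowed parts [] []
    ((if kv.1 ≠ [] then PySem.Str.join ", " kv.1 else default), kv.2)

-- ===== PRECONDITION & SPEC =====
def Spec_sanitize_csv (raw : String) (allowed : List String) (default : String) (out : String × List String) : Prop := out = sanitize_csv_alt raw allowed default
instance (raw : String) (allowed : List String) (default : String) (out : String × List String) : Decidable (Spec_sanitize_csv raw allowed default out) := by unfold Spec_sanitize_csv; infer_instance

-- ===== CLAIM (what is proved, stated in full; the proofs are below) =====
def Claim_equal_sanitize_csv : Prop := ∀ (raw : String) (allowed : List String) (default : String), Dom_sanitize_csv raw allowed default → Spec_sanitize_csv raw allowed default (sanitize_csv raw allowed default)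

-- ===== LEMMAS AND PROOFS =====

theorem sanitizeWork_nil (allowed kept viol : List String) :
    sanitizeWork allowed [] kept viol = (kept, viol) := by
  rw [sanitizeWork.eq_def]

theorem sanitizeWork_cons (allowed : List String) (h : String) (work kept viol : List String) :
    sanitizeWork allowed (h :: work) kept viol =
      if h ∈ allowed then
        sanitizeWork allowed (work.filter (fun q => decide (q ≠ h))) (kept ++ [h]) viol
      else
        sanitizeWork allowed work kept (viol ++ [h]) := by
  rw [sanitizeWork.eq_def]

-- A's fold from accumulator (k, v), provided k holds only allowed tags, equals B's
-- worklist loop run on the parts with the already-kept tags deleted.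
theorem sanitize_loop_eq (allowed : List String) (parts k v : List String)
    (hk : ∀ x ∈ k, x ∈ allowed) :
    parts.foldl (fun (acc : List String × List String) part =>
      if part ∈ allowed ∧ part ∉ acc.1 then (acc.1 ++ [part], acc.2)
      else if part ∉ allowed then (acc.1, acc.2 ++ [part])
      else acc) (k, v)
    = sanitizeWork allowed (parts.filter (fun q => decide (q ∉ k))) k v := by
  induction parts generalizing k v with
  | nil => simp [sanitizeWork_nil]
  | cons p t ih =>
    by_cases hp : p ∈ allowed
    · by_cases hpk : p ∈ k
      · simpa [hp, hpk] using ih k v hk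
      · simp only [List.foldl_cons, List.filter_cons, hpk, not_false_eq_true, decide_true,
          and_true, if_pos hp, if_true]
        rw [sanitizeWork_cons, if_pos hp]
        have hfilt : (t.filter (fun q => decide (q ∉ k))).filter (fun q => decide (q ≠ p))
            = t.filter (fun q => decide (q ∉ k ++ [p])) := by
          rw [List.filter_filter]
          apply List.filter_congr
          intro a _
          simp [List.mem_append, Bool.and_comm]
        rw [hfilt]
        exact ih (k ++ [p]) v (by
          intro x hx
          rcases List.mem_append.mp hx with h1 | h1
          · exact hk x h1
          · simp at h1; simpa [h1] using hp)
    · have hpk : p ∉ k := fun h => hp (hk p h)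
      simp only [List.foldl_cons, List.filter_cons, hpk, not_false_eq_true, decide_true,
        and_true, if_neg hp, if_pos hp, if_true]
      rw [sanitizeWork_cons, if_neg hp]
      exact ih k (v ++ [p]) hk

theorem sanitize_csv_eq (raw : String) (allowed : List String) (default : String) :
    sanitize_csv raw allowed default = sanitize_csv_alt raw allowed default := by
  have h := sanitize_loop_eq allowed
    ((((PySem.Str.split? raw ",").getD []).map (fun p => PySem.Str.strip p)).filter (fun p => p ≠ ""))
    [] [] (by simp)
  simp only [List.not_mem_nil, not_false_eq_true, decide_true, List.filter_true] at h
  simp only [sanitize_csv, sanitize_csv_alt]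
  rw [h]

-- ===== VERDICT (by name: the statement is the Claim_ definition above) =====
theorem sanitize_csv_spec : Claim_equal_sanitize_csv := by
  intro raw allowed default _
  exact sanitize_csv_eq raw allowed default
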